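-- pv_equiv track=rewrite | github.com/szr22/algorithm | leetcode/517.super-washing-machines.py | findMinMovesBetter
-- ===== SOURCE A (Python) =====
-- from typing import List
--
-- def findMinMovesBetter(machines: List[int]) -> int:
--     n = len(machines)
--     if n == 0:
--         return -1
--     total = [0, machines[0]]
--     for i in range(1, n):
--         total.append(machines[i]+total[i])
--     if total[-1] % n != 0:
--         return -1
--     res = 0
--     avg = total[-1] // n
--     for i in range(n):
--         lCnt = total[i] - avg*i
--         rCnt = total[-1] - total[i+1] - avg*(n-1-i)
--         if lCnt>0 and rCnt>0:
--             res = max(res, max(lCnt, rCnt))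
--         elif lCnt<0 and rCnt<0:
--             res = max(res, 0 - lCnt - rCnt)
--         else:
--             res = max(res, max(abs(lCnt), abs(rCnt)))
--     return res
-- ===== SOURCE B (Python) =====
-- from typing import List
--
-- def findMinMovesBetter(machines: List[int]) -> int:
--     n = len(machines)
--     if n == 0:
--         return -1
--     s = sum(machines)
--     if s % n != 0:
--         return -1
--     avg = s // n
--     bal = 0
--     res = 0
--     for m in machines:
--         diff = m - avg
--         bal += diff
--         res = max(res, abs(bal), diff)
--     return res
-- ===== Notes on version B (the rewrite author's own statement) =====
-- stated objective: simpler
-- what changed: Replaces A's explicit prefix-sum array and three-way lCnt/rCnt case analysis with a single pass keeping a running balance bal and taking res = max(res, abs(bal), diff) at each machine.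
import Mathlib
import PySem

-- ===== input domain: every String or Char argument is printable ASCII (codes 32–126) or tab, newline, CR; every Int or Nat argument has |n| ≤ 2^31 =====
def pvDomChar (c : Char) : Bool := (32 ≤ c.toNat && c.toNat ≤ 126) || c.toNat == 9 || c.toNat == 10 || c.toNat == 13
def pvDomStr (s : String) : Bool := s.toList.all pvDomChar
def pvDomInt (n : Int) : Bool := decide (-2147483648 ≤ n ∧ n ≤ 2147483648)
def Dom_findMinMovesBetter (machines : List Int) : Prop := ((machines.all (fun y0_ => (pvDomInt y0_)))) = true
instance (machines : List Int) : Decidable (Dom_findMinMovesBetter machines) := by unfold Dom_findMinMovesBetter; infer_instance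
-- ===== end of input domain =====

-- B replaces A's prefix-sum array and three-way case analysis with a single
-- running-balance pass; same O(n) time, O(1) extra space, simpler code.

-- ===== PORT A =====
def findMinMovesBetter (machines : List Int) : Int :=
  let n : Int := machines.length
  if n == 0 then -1 else
  let total := (PySem.List.pyRange 1 n 1).foldl
      (fun t i => t ++ [PySem.List.pyGetD machines i 0 + PySem.List.pyGetD t i 0])
      [0, PySem.List.pyGetD machines 0 0]
  if PySem.Int.mod (PySem.List.pyGetD total (-1) 0) n ≠ 0 then -1 else
  let res : Int := 0
  let avg := PySem.Int.floordiv (PySem.List.pyGetD total (-1) 0) n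
  (PySem.List.pyRange 0 n 1).foldl
    (fun res i =>
      let lCnt := PySem.List.pyGetD total i 0 - avg * i
      let rCnt := PySem.List.pyGetD total (-1) 0 - PySem.List.pyGetD total (i+1) 0 - avg * (n - 1 - i)
      if lCnt > 0 ∧ rCnt > 0 then max res (max lCnt rCnt)
      else if lCnt < 0 ∧ rCnt < 0 then max res (0 - lCnt - rCnt)
      else max res (max |lCnt| |rCnt|)) res

-- ===== PORT B =====
def findMinMovesBetter_alt (machines : List Int) : Int :=
  let n : Int := machines.length
  if n == 0 then -1 else
  let s := machines.foldl (· + ·) 0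
  if PySem.Int.mod s n ≠ 0 then -1 else
  let avg := PySem.Int.floordiv s n
  (machines.foldl (fun (p : Int × Int) m =>
      let diff := m - avg
      let bal := p.1 + diff
      (bal, max (max p.2 |bal|) diff)) ((0 : Int), (0 : Int))).2

-- ===== PRECONDITION & SPEC =====
def Spec_findMinMovesBetter (machines : List Int) (out : Int) : Prop := out = findMinMovesBetter_alt machines
instance (machines : List Int) (out : Int) : Decidable (Spec_findMinMovesBetter machines out) := by unfold Spec_findMinMovesBetter; infer_instance

-- ===== CLAIM (what is proved, stated in full; the proofs are below) =====
def Claim_equal_findMinMovesBetter : Prop := ∀ (machines : List Int), Dom_findMinMovesBetter machines → Spec_findMinMovesBetter machines (findMinMovesBetter machines)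

-- ===== LEMMAS AND PROOFS =====

/-- Prefix-sum list: `pfx s xs = [s, s+x0, s+x0+x1, …]` (A's `total` when `s = 0`). -/
def pfx (s : Int) : List Int → List Int
  | [] => [s]
  | m :: rest => s :: pfx (s + m) rest

/-- A's second loop, rewritten as a structural recursion carrying the balance. -/
def goA (avg : Int) : List Int → Int → Int → Int
  | [], _, res => res
  | m :: rest, bal, res =>
      let l := bal
      let bal' := bal + (m - avg)
      let r := -bal'
      goA avg rest bal'
        (if l > 0 ∧ r > 0 then max res (max l r)
         else if l < 0 ∧ r < 0 then max res (0 - l - r)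
         else max res (max |l| |r|))

theorem pfx_ne_nil (xs : List Int) (s : Int) : pfx s xs ≠ [] := by
  cases xs <;> simp [pfx]

theorem getD_pfx (xs : List Int) (s : Int) (j : Nat) (d : Int) (hj : j ≤ xs.length) :
    (pfx s xs).getD j d = s + (xs.take j).sum := by
  induction xs generalizing s j with
  | nil =>
      have hj0 : j = 0 := by simpa using hj
      subst hj0; simp [pfx]
  | cons m rest ih =>
      cases j with
      | zero => simp [pfx]
      | succ j =>
          simp only [pfx, List.getD_cons_succ, List.take_succ_cons, List.sum_cons]
          rw [ih (s + m) j (by simpa using hj)]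
          ring

theorem getLast_pfx (xs : List Int) (s : Int) :
    (pfx s xs).getLast (pfx_ne_nil xs s) = s + xs.sum := by
  induction xs generalizing s with
  | nil => simp [pfx]
  | cons m rest ih =>
      have h := pfx_ne_nil rest (s + m)
      rw [show (pfx s (m :: rest)).getLast (pfx_ne_nil (m :: rest) s)
            = (pfx (s + m) rest).getLast h from List.getLast_cons h, ih]
      simp [add_assoc]

theorem pfx_last (xs : List Int) (s : Int) (d : Int) :
    PySem.List.pyGetD (pfx s xs) (-1) d = s + xs.sum := by
  rw [PySem.List.pyGetD_neg_one (pfx s xs) d (pfx_ne_nil xs s), getLast_pfx]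

theorem pfx_snoc (xs : List Int) (s : Int) (j : Nat) (hj : j < xs.length) :
    pfx s (xs.take (j + 1)) = pfx s (xs.take j) ++ [xs[j] + (s + (xs.take j).sum)] := by
  induction xs generalizing s j with
  | nil => simp at hj
  | cons m rest ih =>
      cases j with
      | zero => simp [pfx]; ring
      | succ j =>
          simp only [List.take_succ_cons, pfx, List.getElem_cons_succ, List.sum_cons,
            List.cons_append]
          rw [ih (s + m) j (by simpa using hj)]
          ring_nf

/-- The first loop of A builds exactly `pfx 0 machines`. -/
theorem buildA (ms : List Int) (dn k : Nat) (hk : 1 ≤ k) (hkd : k + dn = ms.length) :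
    (PySem.List.pyRange (k : Int) (ms.length : Int) 1).foldl
      (fun t i => t ++ [PySem.List.pyGetD ms i 0 + PySem.List.pyGetD t i 0])
      (pfx 0 (ms.take k)) = pfx 0 ms := by
  induction dn generalizing k with
  | zero =>
      have hk' : k = ms.length := by omega
      rw [PySem.List.pyRange_one_eq_nil (by exact_mod_cast le_of_eq hk'.symm)]
      simp [hk']
  | succ dn ih =>
      have hlt : (k : Int) < (ms.length : Int) := by exact_mod_cast (by omega : k < ms.length)
      rw [PySem.List.pyRange_one_cons hlt]
      simp only [List.foldl_cons]
      have h1 : PySem.List.pyGetD ms (k : Int) 0 = ms[k]'(by omega) := by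
        rw [PySem.List.pyGetD_natCast, List.getD_eq_getElem ms 0 (by omega)]
      have h2 : PySem.List.pyGetD (pfx 0 (ms.take k)) (k : Int) 0 = 0 + (ms.take k).sum := by
        rw [PySem.List.pyGetD_natCast]
        have := getD_pfx (ms.take k) 0 k 0 (by simp; omega)
        simpa [List.take_take] using this
      rw [h1, h2, show ((k : Int) + 1) = ((k + 1 : Nat) : Int) by push_cast; ring,
          ← pfx_snoc ms 0 k (by omega)]
      exact ih (k + 1) (by omega) (by omega)

/-- A's second loop, over indices into `total = pfx 0 ms`, equals `goA` on the suffix. -/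
theorem loopA (ms : List Int) (avg : Int) (hsum : ms.sum = avg * (ms.length : Int))
    (k : Nat) (dn : Nat) (hkd : k + dn = ms.length) (res : Int) :
    (PySem.List.pyRange (k : Int) (ms.length : Int) 1).foldl
      (fun res i =>
        let lCnt := PySem.List.pyGetD (pfx 0 ms) i 0 - avg * i
        let rCnt := ms.sum -
            PySem.List.pyGetD (pfx 0 ms) (i + 1) 0 - avg * ((ms.length : Int) - 1 - i)
        if lCnt > 0 ∧ rCnt > 0 then max res (max lCnt rCnt)
        else if lCnt < 0 ∧ rCnt < 0 then max res (0 - lCnt - rCnt)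
        else max res (max |lCnt| |rCnt|)) res
    = goA avg (ms.drop k) ((ms.take k).sum - avg * (k : Int)) res := by
  induction dn generalizing k res with
  | zero =>
      have hk' : k = ms.length := by omega
      rw [PySem.List.pyRange_one_eq_nil (by exact_mod_cast le_of_eq hk'.symm)]
      simp [hk', goA]
  | succ dn ih =>
      have hklt : k < ms.length := by omega
      have hlt : (k : Int) < (ms.length : Int) := by exact_mod_cast hklt
      rw [PySem.List.pyRange_one_cons hlt]
      simp only [List.foldl_cons]
      have hdrop : ms.drop k = ms[k] :: ms.drop (k + 1) := List.drop_eq_getElem_cons hklt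
      have h1 : PySem.List.pyGetD (pfx 0 ms) (k : Int) 0 = (ms.take k).sum := by
        rw [PySem.List.pyGetD_natCast]
        simpa using getD_pfx ms 0 k 0 (le_of_lt hklt)
      have h2 : PySem.List.pyGetD (pfx 0 ms) (((k + 1 : Nat) : Int)) 0 = (ms.take k).sum + ms[k] := by
        rw [PySem.List.pyGetD_natCast]
        have := getD_pfx ms 0 (k + 1) 0 hklt
        rw [List.sum_take_succ ms k hklt] at this
        simpa using this
      have hcast : ((k : Int) + 1) = ((k + 1 : Nat) : Int) := by push_cast; ring
      rw [hcast, ih (k + 1) (by omega), hdrop]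
      simp only [goA]
      have harg : (ms.take (k + 1)).sum - avg * ((k + 1 : Nat) : Int)
          = (ms.take k).sum - avg * (k : Int) + (ms[k] - avg) := by
        rw [List.sum_take_succ ms k hklt]; push_cast; ring
      rw [harg]
      congr 1
      simp only [h1, h2]
      have hr : ms.sum - ((ms.take k).sum + ms[k]) - avg * ((ms.length : Int) - 1 - (k : Int))
          = -((ms.take k).sum - avg * (k : Int) + (ms[k] - avg)) := by
        rw [hsum]; ring
      rw [hr]

/-- B's loop equals `goA`: the running-balance pass computes the same maximum. -/
theorem goA_eq_foldB (avg : Int) (xs : List Int) (b r : Int) (hbr : |b| ≤ r) :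
    goA avg xs b r
    = (xs.foldl (fun (p : Int × Int) m =>
        let diff := m - avg
        let bal := p.1 + diff
        (bal, max (max p.2 |bal|) diff)) (b, r)).2 := by
  induction xs generalizing b r with
  | nil => simp [goA]
  | cons m rest ih =>
      simp only [goA, List.foldl_cons]
      have hstep : (if b > 0 ∧ -(b + (m - avg)) > 0 then max r (max b (-(b + (m - avg))))
          else if b < 0 ∧ -(b + (m - avg)) < 0 then max r (0 - b - -(b + (m - avg)))
          else max r (max |b| |(-(b + (m - avg)))|))
          = max (max r |b + (m - avg)|) (m - avg) := by
        simp only [abs_neg]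
        rcases abs_cases b with ⟨h1, h2⟩ | ⟨h1, h2⟩ <;>
          rcases abs_cases (b + (m - avg)) with ⟨h3, h4⟩ | ⟨h3, h4⟩ <;>
          rw [h1] at hbr <;> simp only [h1, h3] <;> split_ifs <;>
          simp only [max_def] <;> split_ifs <;> omega
      rw [hstep]
      exact ih (b + (m - avg)) _ (le_trans (le_max_right r _) (le_max_left _ _))

theorem sum_foldl (xs : List Int) : xs.foldl (· + ·) 0 = xs.sum := by
  simpa using (List.sum_eq_foldl (l := xs)).symm

-- ===== VERDICT (by name: the statement is the Claim_ definition above) =====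
theorem findMinMovesBetter_spec : Claim_equal_findMinMovesBetter := by
  intro machines _
  unfold Spec_findMinMovesBetter findMinMovesBetter findMinMovesBetter_alt
  cases machines with
  | nil => simp
  | cons m0 rest =>
      set ms : List Int := m0 :: rest with hms
      have hlen : 0 < ms.length := by simp [hms]
      have hlen0 : ((ms.length : Int) == 0) = false := by
        rw [beq_eq_false_iff_ne]
        omega
      simp only [hlen0, Bool.false_eq_true, if_false]
      have hbuild : (PySem.List.pyRange 1 (ms.length : Int) 1).foldl
          (fun t i => t ++ [PySem.List.pyGetD ms i 0 + PySem.List.pyGetD t i 0])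
          [0, PySem.List.pyGetD ms 0 0] = pfx 0 ms := by
        have hinit : ([0, PySem.List.pyGetD ms 0 0] : List Int) = pfx 0 (ms.take 1) := by
          simp [hms, pfx, PySem.List.pyGetD]
        rw [hinit, show (1 : Int) = ((1 : Nat) : Int) by norm_num]
        exact buildA ms (ms.length - 1) 1 le_rfl (by omega)
      rw [hbuild, sum_foldl]
      have h3 : PySem.List.pyGetD (pfx 0 ms) (-1) 0 = ms.sum := by
        simpa using pfx_last ms 0 0
      rw [h3]
      by_cases hmod : PySem.Int.mod ms.sum ((ms.length : Int)) ≠ 0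
      · rw [if_pos hmod, if_pos hmod]
      · rw [if_neg hmod, if_neg hmod]
        simp only [ne_eq, not_not] at hmod
        have hsum : ms.sum
            = PySem.Int.floordiv ms.sum (ms.length : Int) * (ms.length : Int) := by
          have := PySem.Int.floordiv_mul_add_mod ms.sum (ms.length : Int)
          omega
        have hloop := loopA ms (PySem.Int.floordiv ms.sum (ms.length : Int)) hsum
          0 ms.length (by omega) 0
        simp only [Nat.cast_zero, List.take_zero, List.drop_zero, List.sum_nil,
          mul_zero, sub_zero] at hloop
        rw [hloop]
        exact goA_eq_foldB _ ms 0 0 (by simp)
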